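-- pv_equiv track=rewrite | github.com/intelecto/extractor | extractor.py | fixFormCaption
-- ===== SOURCE A (Python) =====
-- def fixFormCaption(line):
--     """
--     Fix ASCII code
--     """
--     fix = {'#39' : '',  '#186': 'º', '#195': 'Ç', '#231': 'ç',
--            '#192': 'A', '#193': 'Á', '#199': 'Ã', '#174': 'C',
--            '#194': 'Â', '#226': 'â', '#227': 'ã', '#225': 'á',
--            '#224': 'à', '#201': 'É', '#202': 'Ê', '#233': 'é',
--            '#234': 'ê', '#205': 'Í', '#237': 'í', '#211': 'Ó',
--            '#212': 'Ô', '#243': 'ó', '#244': 'ô', '#245': 'õ',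
--            '#218': 'Ú', '#220': 'Ü', '#250': 'ú', '#252': 'ü'}
--
--     for key, value in fix.items():
--         line = line.replace(key, value)
--     return line
-- ===== SOURCE B (Python) =====
-- _FIX = {'#186': 'º', '#195': 'Ç', '#231': 'ç',
--         '#192': 'A', '#193': 'Á', '#199': 'Ã', '#174': 'C',
--         '#194': 'Â', '#226': 'â', '#227': 'ã', '#225': 'á',
--         '#224': 'à', '#201': 'É', '#202': 'Ê', '#233': 'é',
--         '#234': 'ê', '#205': 'Í', '#237': 'í', '#211': 'Ó',
--         '#212': 'Ô', '#243': 'ó', '#244': 'ô', '#245': 'õ',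
--         '#218': 'Ú', '#220': 'Ü', '#250': 'ú', '#252': 'ü'}
--
-- def fixFormCaption(line):
--     line = line.replace('#39', '')
--     out = []
--     i = 0
--     n = len(line)
--     while i < n:
--         c = line[i]
--         if c == '#' and i + 4 <= n and all('0' <= d <= '9' for d in line[i+1:i+4]):
--             chunk = line[i:i+4]
--             out.append(_FIX.get(chunk, chunk))
--             i += 4
--         else:
--             out.append(c)
--             i += 1
--     return ''.join(out)
-- ===== Notes on version B (the rewrite author's own statement) =====
-- stated objective: alternative
-- what changed: A makes 28 sequential str.replace passes over the string; B removes '#39' once and then does a single left-to-right scan that recognises '#ddd' windows and substitutes them via one dict lookup, so the 27 accent replacements become one table-driven pass.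
import Mathlib
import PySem

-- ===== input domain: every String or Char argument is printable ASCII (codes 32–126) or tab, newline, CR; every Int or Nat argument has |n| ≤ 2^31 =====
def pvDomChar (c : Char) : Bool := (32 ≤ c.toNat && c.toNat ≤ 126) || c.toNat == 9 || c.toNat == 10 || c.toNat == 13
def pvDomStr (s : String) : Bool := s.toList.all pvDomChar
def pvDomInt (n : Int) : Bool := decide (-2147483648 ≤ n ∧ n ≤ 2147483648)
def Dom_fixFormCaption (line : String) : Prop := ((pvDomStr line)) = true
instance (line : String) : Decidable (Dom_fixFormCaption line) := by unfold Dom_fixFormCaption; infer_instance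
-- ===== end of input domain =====

-- B: one table-driven scan (plus a single '#39' removal pass) instead of 28 sequential replace passes; alternative algorithm, return value proved identical.


-- ===== PORT A =====
-- A replaces each of the 28 HTML-entity codes in dict-insertion order with str.replace;
-- the loop over fix.items() is the fold over fixTable below.
def fixTable : List (String × String) :=
  [("#39", ""), ("#186", "º"), ("#195", "Ç"), ("#231", "ç"),
   ("#192", "A"), ("#193", "Á"), ("#199", "Ã"), ("#174", "C"),
   ("#194", "Â"), ("#226", "â"), ("#227", "ã"), ("#225", "á"),
   ("#224", "à"), ("#201", "É"), ("#202", "Ê"), ("#233", "é"),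
   ("#234", "ê"), ("#205", "Í"), ("#237", "í"), ("#211", "Ó"),
   ("#212", "Ô"), ("#243", "ó"), ("#244", "ô"), ("#245", "õ"),
   ("#218", "Ú"), ("#220", "Ü"), ("#250", "ú"), ("#252", "ü")]

def fixFormCaption (line : String) : String :=
  fixTable.foldl (fun l kv => PySem.Str.replace l kv.1 kv.2) line

-- ===== PORT B =====
-- B removes '#39' once, then makes ONE scan: each '#' followed by three ASCII digits is a
-- window looked up in the 27-entry table (kept if absent); mirrors Source B's while-loop scan.
def fixMap : List (List Char × Char) :=
  [(['#','1','8','6'],'º'), (['#','1','9','5'],'Ç'), (['#','2','3','1'],'ç'),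
   (['#','1','9','2'],'A'), (['#','1','9','3'],'Á'), (['#','1','9','9'],'Ã'), (['#','1','7','4'],'C'),
   (['#','1','9','4'],'Â'), (['#','2','2','6'],'â'), (['#','2','2','7'],'ã'), (['#','2','2','5'],'á'),
   (['#','2','2','4'],'à'), (['#','2','0','1'],'É'), (['#','2','0','2'],'Ê'), (['#','2','3','3'],'é'),
   (['#','2','3','4'],'ê'), (['#','2','0','5'],'Í'), (['#','2','3','7'],'í'), (['#','2','1','1'],'Ó'),
   (['#','2','1','2'],'Ô'), (['#','2','4','3'],'ó'), (['#','2','4','4'],'ô'), (['#','2','4','5'],'õ'),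
   (['#','2','1','8'],'Ú'), (['#','2','2','0'],'Ü'), (['#','2','5','0'],'ú'), (['#','2','5','2'],'ü')]

def scanB : List Char → List Char
  | [] => []
  | c :: cs =>
    if c = '#' then
      match _hcs : cs with
      | c1 :: c2 :: c3 :: rest =>
        if c1.isDigit && c2.isDigit && c3.isDigit then
          match fixMap.lookup ['#', c1, c2, c3] with
          | some v => v :: scanB rest
          | none => '#' :: c1 :: c2 :: c3 :: scanB rest
        else '#' :: scanB cs
      | _ => '#' :: scanB cs
    else c :: scanB cs
termination_by l => l.length
decreasing_by all_goals (simp_all <;> omega)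


def fixFormCaption_alt (line : String) : String :=
  String.ofList (scanB (PySem.Str.replace line "#39" "").toList)

-- ===== PRECONDITION & SPEC =====
def Spec_fixFormCaption (line : String) (out : String) : Prop := out = fixFormCaption_alt line
instance (line : String) (out : String) : Decidable (Spec_fixFormCaption line out) := by unfold Spec_fixFormCaption; infer_instance

-- ===== CLAIM (what is proved, stated in full; the proofs are below) =====
def Claim_equal_fixFormCaption : Prop := ∀ (line : String), Dom_fixFormCaption line → Spec_fixFormCaption line (fixFormCaption line)

-- ===== LEMMAS AND PROOFS =====
def replC (old new : List Char) : List Char → List Char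
  | [] => []
  | c :: t =>
    if old.isPrefixOf (c :: t) then new ++ replC old new (t.drop (old.length - 1))
    else c :: replC old new t
termination_by l => l.length
decreasing_by all_goals simp

lemma replC_nil (old new : List Char) : replC old new [] = [] := by rw [replC]

lemma replC_cons (old new : List Char) (c : Char) (t : List Char) :
    replC old new (c :: t) =
      if old.isPrefixOf (c :: t) then new ++ replC old new (t.drop (old.length - 1))
      else c :: replC old new t := by rw [replC]

lemma go_eq (old new : List Char) (hold : old ≠ []) :
    ∀ (fuel : Nat) (s acc : List Char), s.length ≤ fuel →
      PySem.Chars.replace.go old new fuel s acc = acc.reverse ++ replC old new s := by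
  intro fuel
  induction fuel with
  | zero =>
    intro s acc h
    have : s = [] := by cases s <;> simp_all
    subst this
    simp [PySem.Chars.replace.go, replC_nil]
  | succ f ih =>
    intro s acc h
    cases s with
    | nil => simp [PySem.Chars.replace.go, replC_nil]
    | cons c t =>
      rw [PySem.Chars.replace.go]
      by_cases hp : old.isPrefixOf (c :: t)
      · simp only [hp, if_true]
        obtain ⟨o, os, rfl⟩ : ∃ o os, old = o :: os := by
          cases old with | nil => simp at hold | cons a b => exact ⟨a, b, rfl⟩
        have hdl : List.drop (o :: os).length (c :: t) = t.drop os.length := by simp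
        rw [hdl, ih (t.drop os.length) _ (by have := List.length_drop (l := t) (i := os.length); simp at h ⊢; omega)]
        rw [replC_cons, if_pos hp]
        simp
      · simp only [hp]
        rw [ih t (c :: acc) (by simp at h; omega), replC_cons, if_neg hp]
        simp

lemma replace_eq_replC (old new s : List Char) (hold : old ≠ []) :
    PySem.Chars.replace s old new = replC old new s := by
  rw [PySem.Chars.replace]
  have he : old.isEmpty = false := by cases old <;> simp_all
  rw [he]
  simpa using go_eq old new hold s.length s [] (le_refl _)

lemma scanB_nil : scanB [] = [] := by rw [scanB.eq_def]

lemma scanB_not_hash (c : Char) (cs : List Char) (hc : c ≠ '#') :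
    scanB (c :: cs) = c :: scanB cs := by rw [scanB.eq_def]; simp [hc]

lemma scanB_hash_nil : scanB ['#'] = ['#'] := by rw [scanB.eq_def]; simp [scanB_nil]

lemma scanB_hash_one (c1 : Char) : scanB ['#', c1] = '#' :: scanB [c1] := by rw [scanB.eq_def]; simp

lemma scanB_hash_two (c1 c2 : Char) : scanB ['#', c1, c2] = '#' :: scanB [c1, c2] := by
  rw [scanB.eq_def]; simp

lemma scanB_hash_ndigit (c1 c2 c3 : Char) (r : List Char)
    (h : (c1.isDigit && c2.isDigit && c3.isDigit) = false) :
    scanB ('#' :: c1 :: c2 :: c3 :: r) = '#' :: scanB (c1 :: c2 :: c3 :: r) := by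
  rw [scanB.eq_def]; simp [h]

lemma scanB_hash_some (c1 c2 c3 : Char) (r : List Char) (v : Char)
    (h : (c1.isDigit && c2.isDigit && c3.isDigit) = true)
    (hl : fixMap.lookup ['#', c1, c2, c3] = some v) :
    scanB ('#' :: c1 :: c2 :: c3 :: r) = v :: scanB r := by
  rw [scanB.eq_def]; simp [h, hl]

lemma scanB_hash_none (c1 c2 c3 : Char) (r : List Char)
    (h : (c1.isDigit && c2.isDigit && c3.isDigit) = true)
    (hl : fixMap.lookup ['#', c1, c2, c3] = none) :
    scanB ('#' :: c1 :: c2 :: c3 :: r) = '#' :: c1 :: c2 :: c3 :: scanB r := by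
  rw [scanB.eq_def]; simp [h, hl]

def chain (tbl : List (List Char × Char)) (s : List Char) : List Char :=
  tbl.foldl (fun l kv => replC kv.1 [kv.2] l) s

def GoodKV (kv : List Char × Char) : Bool :=
  decide (kv.1.length = 4) && (kv.1.headD ' ' == '#') && (kv.1.drop 1).all Char.isDigit &&
    !kv.2.isDigit && kv.2 != '#'

lemma goodKV_shape (k : List Char) (v : Char) (h : GoodKV (k, v) = true) :
    ∃ d1 d2 d3, k = ['#', d1, d2, d3] ∧ d1.isDigit = true ∧ d2.isDigit = true ∧
      d3.isDigit = true ∧ v.isDigit = false ∧ v ≠ '#' := by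
  unfold GoodKV at h
  rcases k with _ | ⟨c, _ | ⟨d1, _ | ⟨d2, _ | ⟨d3, _ | ⟨e, tl⟩⟩⟩⟩⟩ <;> simp_all

lemma digit_ne_hash {c : Char} (h : c.isDigit = true) : c ≠ '#' := by
  intro hc; subst hc; exact absurd h (by decide)

def Pnd : List Char → Prop
  | [] => True
  | c :: _ => c.isDigit = false

lemma pnd_replC (k : List Char) (v : Char) (hk : GoodKV (k, v) = true)
    (t : List Char) (ht : Pnd t) : Pnd (replC k [v] t) := by
  obtain ⟨d1, d2, d3, rfl, _, _, _, hv, _⟩ := goodKV_shape k v hk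
  cases t with
  | nil => rw [replC_nil]; trivial
  | cons c tt =>
    rw [replC_cons]
    by_cases hp : (['#', d1, d2, d3] : List Char).isPrefixOf (c :: tt)
    · rw [if_pos hp]; exact hv
    · rw [if_neg hp]; exact ht

lemma chain_cons (kv : List Char × Char) (rest : List (List Char × Char)) (s : List Char) :
    chain (kv :: rest) s = chain rest (replC kv.1 [kv.2] s) := rfl

lemma chain_empty (tbl : List (List Char × Char)) : chain tbl [] = [] := by
  induction tbl with
  | nil => rfl
  | cons kv rest ih => rw [chain_cons, replC_nil]; exact ih

lemma chain_pass (tbl : List (List Char × Char)) (hG : ∀ kv ∈ tbl, GoodKV kv = true)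
    (c : Char) (hc : c ≠ '#') (x : List Char) :
    chain tbl (c :: x) = c :: chain tbl x := by
  induction tbl generalizing x with
  | nil => rfl
  | cons kv rest ih =>
    obtain ⟨d1, d2, d3, hk, _, _, _, _, _⟩ :=
      goodKV_shape kv.1 kv.2 (by simpa using hG kv (List.mem_cons_self))
    have hpf : kv.1.isPrefixOf (c :: x) = false := by
      rw [hk]; simp [List.isPrefixOf]; intro h; exact absurd h.symm hc
    rw [chain_cons, replC_cons, hpf, if_neg (by simp)]
    exact ih (fun z hz => hG z (List.mem_cons_of_mem _ hz)) _

lemma chain_passA (tbl : List (List Char × Char)) (hG : ∀ kv ∈ tbl, GoodKV kv = true)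
    (t : List Char) (ht : Pnd t) :
    chain tbl ('#' :: t) = '#' :: chain tbl t := by
  induction tbl generalizing t with
  | nil => rfl
  | cons kv rest ih =>
    have hgood : GoodKV (kv.1, kv.2) = true := by simpa using hG kv (List.mem_cons_self)
    obtain ⟨d1, d2, d3, hk, hd1, _, _, _, _⟩ := goodKV_shape kv.1 kv.2 hgood
    have hpf : kv.1.isPrefixOf ('#' :: t) = false := by
      rw [hk]
      cases t with
      | nil => simp [List.isPrefixOf]
      | cons h tt =>
        simp [List.isPrefixOf]
        intro h1
        exact absurd (h1 ▸ hd1) (by simp_all [Pnd])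
    rw [chain_cons, replC_cons, hpf, if_neg (by simp)]
    exact ih (fun z hz => hG z (List.mem_cons_of_mem _ hz)) _ (pnd_replC kv.1 kv.2 hgood t ht)

lemma chain_passB (tbl : List (List Char × Char)) (hG : ∀ kv ∈ tbl, GoodKV kv = true)
    (c1 : Char) (hc1 : c1.isDigit = true) (t : List Char) (ht : Pnd t) :
    chain tbl ('#' :: c1 :: t) = '#' :: c1 :: chain tbl t := by
  induction tbl generalizing t with
  | nil => rfl
  | cons kv rest ih =>
    have hgood : GoodKV (kv.1, kv.2) = true := by simpa using hG kv (List.mem_cons_self)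
    obtain ⟨d1, d2, d3, hk, _, hd2, _, _, _⟩ := goodKV_shape kv.1 kv.2 hgood
    have hpf : kv.1.isPrefixOf ('#' :: c1 :: t) = false := by
      rw [hk]
      cases t with
      | nil => simp [List.isPrefixOf]
      | cons h tt =>
        simp [List.isPrefixOf]
        intro _ h2
        exact absurd (h2 ▸ hd2) (by simp_all [Pnd])
    have hpf1 : kv.1.isPrefixOf (c1 :: t) = false := by
      rw [hk]; simp [List.isPrefixOf]; intro h
      exact absurd h.symm (digit_ne_hash hc1)
    rw [chain_cons, replC_cons, hpf, if_neg (by simp), replC_cons, hpf1, if_neg (by simp)]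
    exact ih (fun z hz => hG z (List.mem_cons_of_mem _ hz)) _ (pnd_replC kv.1 kv.2 hgood t ht)

lemma chain_passC (tbl : List (List Char × Char)) (hG : ∀ kv ∈ tbl, GoodKV kv = true)
    (c1 c2 : Char) (hc1 : c1.isDigit = true) (hc2 : c2.isDigit = true)
    (t : List Char) (ht : Pnd t) :
    chain tbl ('#' :: c1 :: c2 :: t) = '#' :: c1 :: c2 :: chain tbl t := by
  induction tbl generalizing t with
  | nil => rfl
  | cons kv rest ih =>
    have hgood : GoodKV (kv.1, kv.2) = true := by simpa using hG kv (List.mem_cons_self)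
    obtain ⟨d1, d2, d3, hk, _, _, hd3, _, _⟩ := goodKV_shape kv.1 kv.2 hgood
    have hpf : kv.1.isPrefixOf ('#' :: c1 :: c2 :: t) = false := by
      rw [hk]
      cases t with
      | nil => simp [List.isPrefixOf]
      | cons h tt =>
        simp [List.isPrefixOf]
        intro _ _ h3
        exact absurd (h3 ▸ hd3) (by simp_all [Pnd])
    have hpf1 : kv.1.isPrefixOf (c1 :: c2 :: t) = false := by
      rw [hk]; simp [List.isPrefixOf]; intro h
      exact absurd h.symm (digit_ne_hash hc1)
    have hpf2 : kv.1.isPrefixOf (c2 :: t) = false := by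
      rw [hk]; simp [List.isPrefixOf]; intro h
      exact absurd h.symm (digit_ne_hash hc2)
    rw [chain_cons, replC_cons, hpf, if_neg (by simp), replC_cons, hpf1, if_neg (by simp),
      replC_cons, hpf2, if_neg (by simp)]
    exact ih (fun z hz => hG z (List.mem_cons_of_mem _ hz)) _ (pnd_replC kv.1 kv.2 hgood t ht)

lemma replC_self_prefix (k new r : List Char) (hk : k ≠ []) :
    replC k new (k ++ r) = new ++ replC k new r := by
  obtain ⟨a, as, rfl⟩ : ∃ a as, k = a :: as := by
    cases k with | nil => simp at hk | cons a b => exact ⟨a, b, rfl⟩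
  have : (a :: as) ++ r = a :: (as ++ r) := rfl
  rw [this, replC_cons, if_pos (by rw [List.isPrefixOf_iff_prefix]; exact ⟨r, rfl⟩)]
  simp

lemma prefix_window (d1 d2 d3 c1 c2 c3 : Char) (r : List Char) :
    (['#', d1, d2, d3] : List Char).isPrefixOf ('#' :: c1 :: c2 :: c3 :: r) =
      (d1 == c1 && d2 == c2 && d3 == c3) := by
  simp [List.isPrefixOf, Bool.and_assoc]

lemma chain_pass4 (tbl : List (List Char × Char)) (hG : ∀ kv ∈ tbl, GoodKV kv = true)
    (c1 c2 c3 : Char) (hc1 : c1.isDigit = true) (hc2 : c2.isDigit = true) (hc3 : c3.isDigit = true)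
    (hl : tbl.lookup ['#', c1, c2, c3] = none) (r : List Char) :
    chain tbl ('#' :: c1 :: c2 :: c3 :: r) = '#' :: c1 :: c2 :: c3 :: chain tbl r := by
  induction tbl generalizing r with
  | nil => rfl
  | cons kv rest ih =>
    obtain ⟨k, v⟩ := kv
    have hgood : GoodKV (k, v) = true := hG (k, v) (List.mem_cons_self)
    obtain ⟨d1, d2, d3, hk, _, _, _, _, _⟩ := goodKV_shape k v hgood
    rw [List.lookup_cons] at hl
    have hne : (['#', c1, c2, c3] == k) = false := by
      cases h : (['#', c1, c2, c3] == k) with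
      | false => rfl
      | true => rw [h] at hl; simp at hl
    rw [hne] at hl
    simp only [] at hl
    have hnot : ¬(d1 = c1 ∧ d2 = c2 ∧ d3 = c3) := by
      rintro ⟨rfl, rfl, rfl⟩
      rw [hk] at hne
      simp at hne
    have hpf : k.isPrefixOf ('#' :: c1 :: c2 :: c3 :: r) = false := by
      rw [hk, prefix_window]
      simp
      exact fun e1 e2 e3 => hnot ⟨e1, e2, e3⟩
    have hpf1 : k.isPrefixOf (c1 :: c2 :: c3 :: r) = false := by
      rw [hk]; simp [List.isPrefixOf]; intro h; exact absurd h.symm (digit_ne_hash hc1)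
    have hpf2 : k.isPrefixOf (c2 :: c3 :: r) = false := by
      rw [hk]; simp [List.isPrefixOf]; intro h; exact absurd h.symm (digit_ne_hash hc2)
    have hpf3 : k.isPrefixOf (c3 :: r) = false := by
      rw [hk]; simp [List.isPrefixOf]; intro h; exact absurd h.symm (digit_ne_hash hc3)
    rw [chain_cons]
    simp only
    rw [replC_cons, hpf, if_neg (by simp), replC_cons, hpf1, if_neg (by simp),
      replC_cons, hpf2, if_neg (by simp), replC_cons, hpf3, if_neg (by simp)]
    exact ih (fun z hz => hG z (List.mem_cons_of_mem _ hz)) hl _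

lemma chain_match (tbl : List (List Char × Char)) (hG : ∀ kv ∈ tbl, GoodKV kv = true)
    (c1 c2 c3 : Char) (hc1 : c1.isDigit = true) (hc2 : c2.isDigit = true) (hc3 : c3.isDigit = true)
    (v : Char)
    (hl : tbl.lookup ['#', c1, c2, c3] = some v) (r : List Char) :
    chain tbl ('#' :: c1 :: c2 :: c3 :: r) = v :: chain tbl r := by
  induction tbl generalizing r with
  | nil => simp at hl
  | cons kv rest ih =>
    obtain ⟨k, w⟩ := kv
    have hgood : GoodKV (k, w) = true := hG (k, w) (List.mem_cons_self)
    obtain ⟨d1, d2, d3, hk, _, _, _, _, hwhash⟩ := goodKV_shape k w hgood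
    rw [List.lookup_cons] at hl
    cases heq : (['#', c1, c2, c3] == k) with
    | true =>
      rw [heq] at hl
      simp only [Option.some.injEq] at hl
      subst hl
      have hkeq : k = ['#', c1, c2, c3] := (beq_iff_eq.mp heq).symm
      have hsplit : ('#' :: c1 :: c2 :: c3 :: r) = k ++ r := by rw [hkeq]; rfl
      rw [chain_cons]
      simp only
      rw [hsplit, replC_self_prefix k [w] r (by rw [hkeq]; simp)]
      have hc : ([w] ++ replC k [w] r) = w :: replC k [w] r := rfl
      rw [hc, chain_pass rest (fun z hz => hG z (List.mem_cons_of_mem _ hz)) w hwhash _]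
      rfl
    | false =>
      rw [heq] at hl
      simp only [] at hl
      have hnot : ¬(d1 = c1 ∧ d2 = c2 ∧ d3 = c3) := by
        rintro ⟨rfl, rfl, rfl⟩
        rw [hk] at heq
        simp at heq
      have hpf : k.isPrefixOf ('#' :: c1 :: c2 :: c3 :: r) = false := by
        rw [hk, prefix_window]
        simp
        exact fun e1 e2 e3 => hnot ⟨e1, e2, e3⟩
      have hpf1 : k.isPrefixOf (c1 :: c2 :: c3 :: r) = false := by
        rw [hk]; simp [List.isPrefixOf]; intro h; exact absurd h.symm (digit_ne_hash hc1)
      have hpf2 : k.isPrefixOf (c2 :: c3 :: r) = false := by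
        rw [hk]; simp [List.isPrefixOf]; intro h; exact absurd h.symm (digit_ne_hash hc2)
      have hpf3 : k.isPrefixOf (c3 :: r) = false := by
        rw [hk]; simp [List.isPrefixOf]; intro h; exact absurd h.symm (digit_ne_hash hc3)
      rw [chain_cons]
      simp only
      rw [replC_cons, hpf, if_neg (by simp), replC_cons, hpf1, if_neg (by simp),
        replC_cons, hpf2, if_neg (by simp), replC_cons, hpf3, if_neg (by simp)]
      exact ih (fun z hz => hG z (List.mem_cons_of_mem _ hz)) hl _

lemma goodFix : ∀ kv ∈ fixMap, GoodKV kv = true := by decide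

lemma bnot_eq_true_eq_false {b : Bool} (h : ¬ b = true) : b = false := by
  cases b <;> simp_all

lemma chain_eq_scanB : ∀ (n : Nat) (s : List Char), s.length ≤ n → chain fixMap s = scanB s := by
  intro n
  induction n with
  | zero =>
    intro s h
    have hnil : s = [] := by cases s <;> simp_all
    subst hnil
    rw [chain_empty, scanB_nil]
  | succ n ih =>
    intro s hs
    rcases s with _ | ⟨c, cs⟩
    · rw [chain_empty, scanB_nil]
    by_cases hc : c = '#'
    case neg =>
      rw [chain_pass fixMap goodFix c hc cs, scanB_not_hash c cs hc,
        ih cs (by simp at hs ⊢; omega)]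
    case pos =>
    subst hc
    rcases cs with _ | ⟨c1, _ | ⟨c2, _ | ⟨c3, rest⟩⟩⟩
    · -- "#"
      rw [chain_passA fixMap goodFix [] trivial, chain_empty, scanB_hash_nil]
    · -- "#c1"
      by_cases hd1 : c1.isDigit = true
      · rw [chain_passB fixMap goodFix c1 hd1 [] trivial, chain_empty, scanB_hash_one,
          scanB_not_hash c1 [] (digit_ne_hash hd1), scanB_nil]
      · rw [chain_passA fixMap goodFix [c1] (bnot_eq_true_eq_false hd1), scanB_hash_one,
          ih [c1] (by simp at hs ⊢; omega)]
    · -- "#c1c2"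
      by_cases hd1 : c1.isDigit = true
      · by_cases hd2 : c2.isDigit = true
        · rw [chain_passC fixMap goodFix c1 c2 hd1 hd2 [] trivial, chain_empty, scanB_hash_two,
            scanB_not_hash c1 [c2] (digit_ne_hash hd1),
            scanB_not_hash c2 [] (digit_ne_hash hd2), scanB_nil]
        · rw [chain_passB fixMap goodFix c1 hd1 [c2] (bnot_eq_true_eq_false hd2), scanB_hash_two,
            scanB_not_hash c1 [c2] (digit_ne_hash hd1), ih [c2] (by simp at hs ⊢; omega)]
      · rw [chain_passA fixMap goodFix [c1, c2] (bnot_eq_true_eq_false hd1), scanB_hash_two,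
          ih [c1, c2] (by simp at hs ⊢; omega)]
    · -- "#c1c2c3…"
      by_cases hd1 : c1.isDigit = true
      · by_cases hd2 : c2.isDigit = true
        · by_cases hd3 : c3.isDigit = true
          · cases hlook : fixMap.lookup ['#', c1, c2, c3] with
            | some v =>
              rw [chain_match fixMap goodFix c1 c2 c3 hd1 hd2 hd3 v hlook rest,
                scanB_hash_some c1 c2 c3 rest v (by simp [hd1, hd2, hd3]) hlook,
                ih rest (by simp at hs ⊢; omega)]
            | none =>
              rw [chain_pass4 fixMap goodFix c1 c2 c3 hd1 hd2 hd3 hlook rest,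
                scanB_hash_none c1 c2 c3 rest (by simp [hd1, hd2, hd3]) hlook,
                ih rest (by simp at hs ⊢; omega)]
          · rw [chain_passC fixMap goodFix c1 c2 hd1 hd2 (c3 :: rest) (bnot_eq_true_eq_false hd3),
              scanB_hash_ndigit c1 c2 c3 rest (by simp [bnot_eq_true_eq_false hd3]),
              scanB_not_hash c1 (c2 :: c3 :: rest) (digit_ne_hash hd1),
              scanB_not_hash c2 (c3 :: rest) (digit_ne_hash hd2),
              ih (c3 :: rest) (by simp at hs ⊢; omega)]
        · rw [chain_passB fixMap goodFix c1 hd1 (c2 :: c3 :: rest) (bnot_eq_true_eq_false hd2),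
            scanB_hash_ndigit c1 c2 c3 rest (by simp [bnot_eq_true_eq_false hd2]),
            scanB_not_hash c1 (c2 :: c3 :: rest) (digit_ne_hash hd1),
            ih (c2 :: c3 :: rest) (by simp at hs ⊢; omega)]
      · rw [chain_passA fixMap goodFix (c1 :: c2 :: c3 :: rest) (bnot_eq_true_eq_false hd1),
          scanB_hash_ndigit c1 c2 c3 rest (by simp [bnot_eq_true_eq_false hd1]),
          ih (c1 :: c2 :: c3 :: rest) (by simp at hs ⊢; omega)]


lemma bridge : ∀ (tblS : List (String × String)) (tblC : List (List Char × Char)),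
    tblS.map (fun kv => (kv.1.toList, kv.2.toList)) = tblC.map (fun kv => (kv.1, [kv.2])) →
    (∀ kv ∈ tblC, kv.1 ≠ []) →
    ∀ s : String, (tblS.foldl (fun l kv => PySem.Str.replace l kv.1 kv.2) s).toList
      = chain tblC s.toList := by
  intro tblS
  induction tblS with
  | nil =>
    intro tblC hmap _ s
    cases tblC with
    | nil => rfl
    | cons a b => simp at hmap
  | cons kv restS ih =>
    intro tblC hmap hne s
    cases tblC with
    | nil => simp at hmap
    | cons kc restC =>
      simp only [List.map_cons, List.cons.injEq, Prod.mk.injEq] at hmap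
      obtain ⟨⟨hk, hv⟩, hrest⟩ := hmap
      rw [List.foldl_cons, chain_cons]
      have hstep : (PySem.Str.replace s kv.1 kv.2).toList = replC kc.1 [kc.2] s.toList := by
        show (String.ofList (PySem.Chars.replace s.toList kv.1.toList kv.2.toList)).toList = _
        rw [String.toList_ofList, hk, hv,
          replace_eq_replC kc.1 [kc.2] s.toList (hne kc (List.mem_cons_self))]
      rw [ih restC hrest (fun z hz => hne z (List.mem_cons_of_mem _ hz)) _]
      rw [hstep]



lemma final_eq (line : String) : fixFormCaption line = fixFormCaption_alt line := by
  have hA : (fixFormCaption line).toList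
      = chain fixMap (PySem.Str.replace line "#39" "").toList := by
    rw [fixFormCaption, fixTable, List.foldl_cons]
    exact bridge _ fixMap (by rfl) (by decide) _
  have hB : (fixFormCaption_alt line).toList
      = scanB (PySem.Str.replace line "#39" "").toList := by
    rw [fixFormCaption_alt, String.toList_ofList]
  have hC := chain_eq_scanB (PySem.Str.replace line "#39" "").toList.length
    (PySem.Str.replace line "#39" "").toList (le_refl _)
  apply String.toList_inj.mp
  rw [hA, hB, hC]

-- ===== VERDICT (by name: the statement is the Claim_ definition above) =====
theorem fixFormCaption_spec : Claim_equal_fixFormCaption := by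
  intro line _
  unfold Spec_fixFormCaption
  exact final_eq line
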